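-- pv_equiv track=rewrite | github.com/paradaise/study | Codirovanie/5/5.py | calculate_hamming_code
-- ===== SOURCE A (Python) =====
-- def calculate_hamming_code(data_bits):
--     # Рассчитываем код Хэмминга на основе входных данных
--     n = len(data_bits)
--     r = 0
--     while (2**r) < (n + r + 1):
--         r += 1
--     total_bits = n + r
--     hamming_code = [0] * total_bits
--
--     # Располагаем информационные биты в коде Хэмминга
--     j = 0
--     for i in range(1, total_bits + 1):
--         if i & (i - 1) != 0:
--             hamming_code[i - 1] = data_bits[j]
--             j += 1
--
--     # Рассчитываем значения контрольных битов
--     for i in range(r):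
--         control_bit_position = 2**i
--         control_sum = 0
--         for j in range(1, total_bits + 1):
--             if j & control_bit_position != 0:
--                 control_sum ^= hamming_code[j - 1]
--         hamming_code[control_bit_position - 1] = control_sum
--
--     return hamming_code
-- ===== SOURCE B (Python) =====
-- def calculate_hamming_code(data_bits):
--     # One pass over the positions: place data bits and accumulate every
--     # parity at once from the data values; never re-scan the built array.
--     n = len(data_bits)
--     r = 0
--     while (1 << r) < n + r + 1:
--         r += 1
--     total = n + r
--     parities = [0] * r
--     out = []
--     j = 0
--     for p in range(1, total + 1):
--         if p & (p - 1) == 0: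
--             out.append(0)  # parity placeholder, filled in below
--         else:
--             b = data_bits[j]
--             j += 1
--             out.append(b)
--             parities = [x ^ b if (p >> i) & 1 else x for i, x in enumerate(parities)]
--     for i in range(r):
--         out[(1 << i) - 1] = parities[i]
--     return out
-- ===== Notes on version B (the rewrite author's own statement) =====
-- stated objective: alternative
-- what changed: B makes a single pass over the positions, placing data bits and accumulating all r parity values directly from the data, instead of A's placement pass followed by r separate full re-scans of the built array.
import Mathlib
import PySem

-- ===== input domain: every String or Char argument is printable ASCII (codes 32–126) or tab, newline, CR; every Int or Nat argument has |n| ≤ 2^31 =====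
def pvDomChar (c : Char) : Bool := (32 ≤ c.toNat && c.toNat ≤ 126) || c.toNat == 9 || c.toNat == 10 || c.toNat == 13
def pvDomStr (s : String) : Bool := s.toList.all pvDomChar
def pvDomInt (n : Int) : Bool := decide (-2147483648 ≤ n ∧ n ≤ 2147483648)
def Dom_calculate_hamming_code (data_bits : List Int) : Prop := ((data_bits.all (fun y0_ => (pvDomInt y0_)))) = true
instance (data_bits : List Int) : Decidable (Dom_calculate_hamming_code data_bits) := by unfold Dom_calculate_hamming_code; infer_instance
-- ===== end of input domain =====

-- One honest line: B builds the code in one pass over the positions, accumulating all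
-- parity values directly from the data bits, instead of A's r full re-scans of the array
-- (objective: alternative; same asymptotic cost).

-- termination helper for the shared `while (2**r) < (n+r+1)` loop of both Pythons
theorem pv_two_mul_le_two_pow : ∀ r : Nat, 2 * r ≤ 2 ^ r := by
  intro r
  induction r with
  | zero => simp
  | succ k ih =>
    rcases Nat.eq_zero_or_pos k with h | h
    · subst h; simp
    · have h1 : 1 ≤ 2 ^ k := Nat.one_le_two_pow
      have : 2 * (k + 1) = 2 * k + 2 := by ring
      have h2 : 2 ^ (k + 1) = 2 ^ k + 2 ^ k := by ring
      omega

-- `r = 0; while (2**r) < (n+r+1): r += 1` — identical loop in A and in B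
def hamR (n r : Nat) : Nat :=
  if 2 ^ r < n + r + 1 then hamR n (r + 1) else r
  termination_by n + 1 - r
  decreasing_by
    have := pv_two_mul_le_two_pow r
    omega

-- ===== PORT A =====
-- Python `range(1, total+1)` is ported as `List.range total` with position `k+1`.
-- `data_bits[j]` / `hamming_code[j-1]` are ported with getD: the indices are always
-- in range when reached (A raises on no input), so the default is never returned.
def calculate_hamming_code (data_bits : List Int) : List Int :=
  let n := data_bits.length
  let r := hamR n 0
  let total := n + r
  let placed := (List.range total).foldl
    (fun (st : List Int × Nat) k =>
      let i := k + 1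
      if i &&& (i - 1) ≠ 0 then (st.1.set (i - 1) (data_bits.getD st.2 0), st.2 + 1)
      else st)
    (List.replicate total (0 : Int), 0)
  (List.range r).foldl
    (fun code i =>
      let cbp := 2 ^ i
      let csum := (List.range total).foldl
        (fun acc k =>
          let j := k + 1
          if j &&& cbp ≠ 0 then PySem.Int.bxor acc (code.getD (j - 1) 0) else acc)
        (0 : Int)
      code.set (cbp - 1) csum)
    placed.1

-- ===== PORT B =====
-- state: (out, parities, j); the list comprehension over enumerate(parities) is a map
def calculate_hamming_code_alt (data_bits : List Int) : List Int :=
  let n := data_bits.length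
  let r := hamR n 0
  let total := n + r
  let st := (List.range total).foldl
    (fun (st : List Int × List Int × Nat) k =>
      let p := k + 1
      if p &&& (p - 1) = 0 then (st.1 ++ [(0 : Int)], st.2.1, st.2.2)
      else
        let b := data_bits.getD st.2.2 0
        (st.1 ++ [b],
         (PySem.List.enumerate st.2.1).map (fun ix => if (p >>> ix.1.toNat) &&& 1 = 1 then PySem.Int.bxor ix.2 b else ix.2),
         st.2.2 + 1))
    (([] : List Int), List.replicate r (0 : Int), 0)
  (List.range r).foldl (fun o i => o.set (2 ^ i - 1) (st.2.1.getD i 0)) st.1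

-- ===== PRECONDITION & SPEC =====
def Spec_calculate_hamming_code (data_bits : List Int) (out : List Int) : Prop := out = calculate_hamming_code_alt data_bits
instance (data_bits : List Int) (out : List Int) : Decidable (Spec_calculate_hamming_code data_bits out) := by unfold Spec_calculate_hamming_code; infer_instance

-- ===== CLAIM (what is proved, stated in full; the proofs are below) =====
def Claim_equal_calculate_hamming_code : Prop := ∀ (data_bits : List Int), Dom_calculate_hamming_code data_bits → Spec_calculate_hamming_code data_bits (calculate_hamming_code data_bits)


-- ===== LEMMAS AND PROOFS =====

-- q+1 is "not a power of two" counter: the value of A's j / B's j after q positions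
def pvCnt (m : Nat) : Nat := ((List.range m).filter (fun q => (q + 1) &&& q != 0)).length

-- XOR of the data values at the first m positions whose index has bit s set
def pvXor (data : List Int) (s : Nat) : Nat → Int
  | 0 => 0
  | m + 1 =>
      if ((m + 1) &&& m ≠ 0) ∧ (m + 1).testBit s then
        PySem.Int.bxor (pvXor data s m) (data.getD (pvCnt m) 0)
      else pvXor data s m

theorem pvCnt_succ (m : Nat) :
    pvCnt (m + 1) = if (m + 1) &&& m ≠ 0 then pvCnt m + 1 else pvCnt m := by
  simp only [pvCnt, List.range_succ, List.filter_append, List.length_append]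
  by_cases h : (m + 1) &&& m ≠ 0 <;> simp [h]

theorem hamR_ge (n r0 : Nat) : n + hamR n r0 + 1 ≤ 2 ^ hamR n r0 := by
  unfold hamR
  split
  · exact hamR_ge n (r0 + 1)
  · omega
  termination_by n + 1 - r0
  decreasing_by
    have := pv_two_mul_le_two_pow r0
    omega

theorem pow_and_pred (k : Nat) : 2 ^ k &&& (2 ^ k - 1) = 0 := by
  rw [Nat.and_two_pow_sub_one_eq_mod]
  simp

theorem eq_pow_of_and_pred {p : Nat} (hp : 1 ≤ p) (h : p &&& (p - 1) = 0) :
    p = 2 ^ p.log2 := by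
  by_contra hne
  have h1 : 2 ^ p.log2 ≤ p := Nat.log2_self_le (by omega)
  have h2 : p < 2 ^ (p.log2 + 1) := Nat.lt_log2_self
  have hpow : 2 ^ (p.log2 + 1) = 2 ^ p.log2 + 2 ^ p.log2 := by ring
  obtain ⟨k, hk⟩ : ∃ k, p.log2 = k := ⟨_, rfl⟩
  rw [hk] at h1 h2 hpow hne
  have hx : p = 2 ^ k + (p - 2 ^ k) := by omega
  have hxlt : p - 2 ^ k < 2 ^ k := by omega
  have hb1 : p.testBit k = true := by
    conv_lhs => rw [hx]
    rw [Nat.testBit_two_pow_add_eq, Nat.testBit_lt_two_pow hxlt]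
    rfl
  have hb2 : (p - 1).testBit k = true := by
    have he : p - 1 = 2 ^ k + (p - 2 ^ k - 1) := by omega
    rw [he, Nat.testBit_two_pow_add_eq, Nat.testBit_lt_two_pow (by omega)]
    rfl
  have hz := congrArg (fun x => x.testBit k) h
  simp [Nat.testBit_and, hb1, hb2] at hz

theorem and_pow_ne (j s : Nat) : (j &&& 2 ^ s ≠ 0) ↔ j.testBit s = true := by
  rw [Nat.and_two_pow]
  cases h : j.testBit s
  · simp
  · simp

theorem shift_and_one (p i : Nat) : ((p >>> i) &&& 1 = 1) ↔ p.testBit i = true := by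
  rw [Nat.and_one_is_mod, Nat.shiftRight_eq_div_pow, Nat.testBit_eq_decide_div_mod_eq]
  simp

theorem getD_set_int (l : List Int) (i q : Nat) (v : Int) (hq : q < l.length) :
    (l.set i v).getD q 0 = if i = q then v else l.getD q 0 := by
  have h1 : (l.set i v).getD q 0 = (l.set i v)[q]'(by simpa using hq) :=
    List.getD_eq_getElem _ _ (by simpa using hq)
  rw [h1, List.getElem_set]
  split
  · rfl
  · exact (List.getD_eq_getElem _ _ hq).symm

theorem getD_map_range (f : Nat → Int) (r q : Nat) (hq : q < r) :
    ((List.range r).map f).getD q 0 = f q := by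
  rw [List.getD_eq_getElem _ _ (by simpa using hq)]
  simp

theorem set_map_range (f : Nat → Int) (total q : Nat) (v : Int) :
    ((List.range total).map f).set q v
      = (List.range total).map (fun x => if x = q then v else f x) := by
  apply List.ext_getElem
  · simp
  · intro j h1 h2
    rw [List.getElem_set]
    by_cases h : j = q <;> simp [h, eq_comm]

theorem enum_map_range (g : Nat → Int) (F : Int × Int → Int) (r : Nat) :
    (PySem.List.enumerate ((List.range r).map g) 0).map F
      = (List.range r).map (fun i => F (Int.ofNat i, g i)) := by
  apply List.ext_getElem
  · simp [PySem.List.length_enumerate]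
  · intro k h1 h2
    simp [PySem.List.getElem_enumerate]

-- A's placement loop
theorem placeA (data : List Int) (total : Nat) :
    ∀ m, m ≤ total →
      (List.range m).foldl
        (fun (st : List Int × Nat) k =>
          if (k + 1) &&& (k + 1 - 1) ≠ 0 then
            (st.1.set (k + 1 - 1) (data.getD st.2 0), st.2 + 1)
          else st)
        (List.replicate total (0 : Int), 0)
      = ((List.range total).map
           (fun q => if q < m ∧ (q + 1) &&& q ≠ 0 then data.getD (pvCnt q) 0 else 0),
         pvCnt m) := by
  intro m
  induction m with
  | zero =>
    intro _
    refine Prod.ext ?_ (by simp [pvCnt])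
    apply List.ext_getElem <;> simp
  | succ m ih =>
    intro hm
    rw [List.range_succ, List.foldl_append, ih (by omega)]
    simp only [List.foldl_cons, List.foldl_nil, Nat.add_sub_cancel]
    by_cases h : (m + 1) &&& m ≠ 0
    · simp only [if_pos h]
      rw [set_map_range, pvCnt_succ, if_pos h]
      refine Prod.ext ?_ rfl
      apply List.map_congr_left
      intro x hx
      rw [List.mem_range] at hx
      by_cases hxm : x = m
      · subst hxm
        simp [h]
      · have hiff : (x < m ∧ (x + 1) &&& x ≠ 0) ↔ (x < m + 1 ∧ (x + 1) &&& x ≠ 0) := by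
          constructor <;> rintro ⟨a, b⟩ <;> exact ⟨by omega, b⟩
        rw [if_neg hxm, if_congr hiff rfl rfl]
    · simp only [if_neg h]
      rw [pvCnt_succ, if_neg h]
      refine Prod.ext ?_ rfl
      apply List.map_congr_left
      intro x hx
      rw [List.mem_range] at hx
      by_cases hxm : x = m
      · subst hxm
        simp [h]
      · have hiff : (x < m ∧ (x + 1) &&& x ≠ 0) ↔ (x < m + 1 ∧ (x + 1) &&& x ≠ 0) := by
          constructor <;> rintro ⟨a, b⟩ <;> exact ⟨by omega, b⟩
        rw [if_congr hiff rfl rfl]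

-- A's inner control-sum loop equals pvXor, given what the current array holds
theorem csumA (data : List Int) (total s : Nat) (c : List Int)
    (h1 : ∀ q, q < total → (q + 1) &&& q ≠ 0 → c.getD q 0 = data.getD (pvCnt q) 0)
    (h2 : ∀ q, q < total → (q + 1) &&& q = 0 → (q + 1).testBit s = true → c.getD q 0 = 0) :
    ∀ m, m ≤ total →
      (List.range m).foldl
        (fun acc k =>
          if (k + 1) &&& 2 ^ s ≠ 0 then PySem.Int.bxor acc (c.getD (k + 1 - 1) 0) else acc)
        (0 : Int)
      = pvXor data s m := by
  intro m
  induction m with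
  | zero => intro _; simp [pvXor]
  | succ m ih =>
    intro hm
    rw [List.range_succ, List.foldl_append, ih (by omega)]
    simp only [List.foldl_cons, List.foldl_nil, Nat.add_sub_cancel]
    by_cases hb : (m + 1).testBit s = true
    · rw [if_pos ((and_pow_ne (m + 1) s).mpr hb)]
      by_cases hn : (m + 1) &&& m ≠ 0
      · rw [h1 m (by omega) hn]
        rw [show pvXor data s (m + 1)
              = PySem.Int.bxor (pvXor data s m) (data.getD (pvCnt m) 0) from by
          simp [pvXor, hn, hb]]
      · rw [not_ne_iff] at hn
        rw [h2 m (by omega) hn hb]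
        simp [pvXor, hn]
    · rw [if_neg (by rw [and_pow_ne]; simpa using hb)]
      simp [pvXor, hb]

-- A's outer parity loop: invariant over the number s of processed control bits
theorem outerA (data : List Int) (total : Nat) (c0 : List Int)
    (hlen : c0.length = total)
    (hc1 : ∀ q, q < total → (q + 1) &&& q ≠ 0 → c0.getD q 0 = data.getD (pvCnt q) 0)
    (hc2 : ∀ q, q < total → (q + 1) &&& q = 0 → c0.getD q 0 = 0) :
    ∀ s,
      let cs := (List.range s).foldl
        (fun code i =>
          code.set (2 ^ i - 1)
            ((List.range total).foldl
              (fun acc k =>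
                if (k + 1) &&& 2 ^ i ≠ 0 then PySem.Int.bxor acc (code.getD (k + 1 - 1) 0)
                else acc)
              (0 : Int)))
        c0
      cs.length = total ∧
      (∀ q, q < total → (q + 1) &&& q ≠ 0 → cs.getD q 0 = data.getD (pvCnt q) 0) ∧
      (∀ q, q < total → (q + 1) &&& q = 0 → ∀ k, q + 1 = 2 ^ k →
        cs.getD q 0 = if k < s then pvXor data k total else 0) := by
  intro s
  induction s with
  | zero =>
    refine ⟨hlen, hc1, ?_⟩
    intro q hq hnp k hk
    simpa using hc2 q hq hnp
  | succ s ih =>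
    simp only [List.range_succ, List.foldl_append, List.foldl_cons, List.foldl_nil]
    obtain ⟨ihlen, ih1, ih2⟩ := ih
    set cs := (List.range s).foldl
        (fun code i =>
          code.set (2 ^ i - 1)
            ((List.range total).foldl
              (fun acc k =>
                if (k + 1) &&& 2 ^ i ≠ 0 then PySem.Int.bxor acc (code.getD (k + 1 - 1) 0)
                else acc)
              (0 : Int)))
        c0 with hcs
    have hcsum :
        (List.range total).foldl
          (fun acc k =>
            if (k + 1) &&& 2 ^ s ≠ 0 then PySem.Int.bxor acc (cs.getD (k + 1 - 1) 0) else acc)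
          (0 : Int)
        = pvXor data s total := by
      apply csumA data total s cs ih1 _ total (le_refl _)
      intro q hq hnp hb
      have hq1 : q + 1 = 2 ^ (q + 1).log2 := eq_pow_of_and_pred (by omega) (by simpa using hnp)
      have := ih2 q hq hnp ((q + 1).log2) hq1
      have hks : (q + 1).log2 = s := by
        have : (2 ^ (q + 1).log2).testBit s = true := by rw [← hq1]; exact hb
        rwa [Nat.testBit_two_pow, decide_eq_true_eq] at this
      rw [hks] at this
      simpa using this
    refine ⟨by simpa using ihlen, ?_, ?_⟩
    · intro q hq hnp
      rw [getD_set_int _ _ _ _ (by omega)]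
      have hne : 2 ^ s - 1 ≠ q := by
        intro he
        apply hnp
        have h1 : 0 < 2 ^ s := Nat.two_pow_pos s
        have hq1 : q + 1 = 2 ^ s := by omega
        have hq0 : q = 2 ^ s - 1 := by omega
        rw [hq1, hq0]
        exact pow_and_pred s
      rw [if_neg hne]
      exact ih1 q hq hnp
    · intro q hq hnp k hk
      rw [getD_set_int _ _ _ _ (by omega)]
      by_cases hks : k = s
      · subst hks
        have h1 : 0 < 2 ^ k := Nat.two_pow_pos k
        rw [if_pos (by omega), hcsum, if_pos (by omega)]
      · have h1 : 0 < 2 ^ s := Nat.two_pow_pos s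
        have hne : 2 ^ s - 1 ≠ q := by
          intro he
          have : q + 1 = 2 ^ s := by omega
          rw [hk] at this
          exact hks (Nat.pow_right_injective (by omega) this)
        rw [if_neg hne, ih2 q hq hnp k hk]
        have hiff : k < s ↔ k < s + 1 := by omega
        rw [if_congr hiff rfl rfl]

-- B's single pass: out, parities and j after m positions
theorem placeB (data : List Int) (r : Nat) :
    ∀ m,
      (List.range m).foldl
        (fun (st : List Int × List Int × Nat) k =>
          if (k + 1) &&& (k + 1 - 1) = 0 then (st.1 ++ [(0 : Int)], st.2.1, st.2.2)
          else
            (st.1 ++ [data.getD st.2.2 0],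
             (PySem.List.enumerate st.2.1).map
               (fun ix =>
                 if ((k + 1) >>> ix.1.toNat) &&& 1 = 1 then
                   PySem.Int.bxor ix.2 (data.getD st.2.2 0)
                 else ix.2),
             st.2.2 + 1))
        (([] : List Int), List.replicate r (0 : Int), 0)
      = ((List.range m).map (fun q => if (q + 1) &&& q ≠ 0 then data.getD (pvCnt q) 0 else 0),
         (List.range r).map (fun i => pvXor data i m),
         pvCnt m) := by
  intro m
  induction m with
  | zero =>
    refine Prod.ext (by simp) (Prod.ext ?_ (by simp [pvCnt]))
    apply List.ext_getElem <;> simp [pvXor]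
  | succ m ih =>
    rw [List.range_succ, List.foldl_append, ih]
    simp only [List.foldl_cons, List.foldl_nil, Nat.add_sub_cancel]
    by_cases h : (m + 1) &&& m = 0
    · simp only [if_pos h]
      rw [pvCnt_succ, if_neg (by omega)]
      refine Prod.ext ?_ (Prod.ext ?_ rfl)
      · rw [List.map_append]
        simp [h]
      · apply List.map_congr_left
        intro i _
        rw [show pvXor data i (m + 1) = pvXor data i m from by simp [pvXor, h]]
    · simp only [if_neg h]
      rw [pvCnt_succ, if_pos h]
      refine Prod.ext ?_ (Prod.ext ?_ rfl)
      · rw [List.map_append]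
        simp [h]
      · rw [enum_map_range]
        apply List.map_congr_left
        intro i _
        have htn : (Int.ofNat i).toNat = i := rfl
        rw [htn]
        by_cases hb : (m + 1).testBit i = true
        · rw [if_pos ((shift_and_one (m + 1) i).mpr hb)]
          rw [show pvXor data i (m + 1)
                = PySem.Int.bxor (pvXor data i m) (data.getD (pvCnt m) 0) from by
            simp [pvXor, h, hb]]
        · rw [if_neg (by rw [shift_and_one]; simpa using hb)]
          rw [show pvXor data i (m + 1) = pvXor data i m from by simp [pvXor, hb]]

-- B's final pass writing the parity slots (V is the value written for control bit i)
theorem setfoldB (V : Nat → Int) (c0 : List Int) :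
    ∀ s,
      let cs := (List.range s).foldl (fun o i => o.set (2 ^ i - 1) (V i)) c0
      cs.length = c0.length ∧
      (∀ q, q < c0.length → (∀ k, k < s → q + 1 ≠ 2 ^ k) → cs.getD q 0 = c0.getD q 0) ∧
      (∀ q, q < c0.length → ∀ k, k < s → q + 1 = 2 ^ k → cs.getD q 0 = V k) := by
  intro s
  induction s with
  | zero => exact ⟨rfl, fun q _ _ => rfl, fun q _ k hk _ => by omega⟩
  | succ s ih =>
    simp only [List.range_succ, List.foldl_append, List.foldl_cons, List.foldl_nil]
    obtain ⟨ihlen, ih1, ih2⟩ := ih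
    refine ⟨by simpa using ihlen, ?_, ?_⟩
    · intro q hq hne
      rw [getD_set_int _ _ _ _ (by omega)]
      have h1 : 0 < 2 ^ s := Nat.two_pow_pos s
      rw [if_neg (by intro he; exact hne s (by omega) (by omega))]
      exact ih1 q hq (fun k hk => hne k (by omega))
    · intro q hq k hk hqk
      rw [getD_set_int _ _ _ _ (by omega)]
      have h1 : 0 < 2 ^ s := Nat.two_pow_pos s
      by_cases hks : k = s
      · subst hks
        rw [if_pos (by omega)]
      · have h2 : 0 < 2 ^ k := Nat.two_pow_pos k
        rw [if_neg (by
          intro he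
          have : q + 1 = 2 ^ s := by omega
          rw [hqk] at this
          exact hks (Nat.pow_right_injective (by omega) this))]
        exact ih2 q hq k (by omega) hqk

-- ===== VERDICT (by name: the statement is the Claim_ definition above) =====
theorem calculate_hamming_code_spec : Claim_equal_calculate_hamming_code := by
  intro data _
  unfold Spec_calculate_hamming_code calculate_hamming_code calculate_hamming_code_alt
  simp only []
  set n := data.length with hn
  set r := hamR n 0 with hr
  set total := n + r with htotal
  have htot_lt : total < 2 ^ r := by
    have h := hamR_ge n 0
    rw [← hr] at h
    omega
  -- characterize A's placement
  have hA := placeA data total total (le_refl _)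
  rw [hA]
  -- the placed array, with the redundant `q < total` dropped
  have hc0A :
      (List.range total).map
        (fun q => if q < total ∧ (q + 1) &&& q ≠ 0 then data.getD (pvCnt q) 0 else 0)
      = (List.range total).map
        (fun q => if (q + 1) &&& q ≠ 0 then data.getD (pvCnt q) 0 else 0) := by
    apply List.map_congr_left
    intro x hx
    rw [List.mem_range] at hx
    by_cases h : (x + 1) &&& x ≠ 0 <;> simp [h, hx]
  rw [hc0A]
  -- characterize B's pass
  have hB := placeB data r total
  rw [hB]
  -- facts about the common initial array
  set c0 : List Int :=
    (List.range total).map (fun q => if (q + 1) &&& q ≠ 0 then data.getD (pvCnt q) 0 else 0)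
    with hc0
  have hlen : c0.length = total := by simp [hc0]
  have hc1 : ∀ q, q < total → (q + 1) &&& q ≠ 0 → c0.getD q 0 = data.getD (pvCnt q) 0 := by
    intro q hq hnp
    rw [hc0, getD_map_range _ _ _ hq, if_pos hnp]
  have hc2 : ∀ q, q < total → (q + 1) &&& q = 0 → c0.getD q 0 = 0 := by
    intro q hq hnp
    rw [hc0, getD_map_range _ _ _ hq, if_neg (by omega)]
  have hAfin := outerA data total c0 hlen hc1 hc2 r
  obtain ⟨hAlen, hA1, hA2⟩ := hAfin
  have hBfin := setfoldB
    (fun i => (((List.range r).map (fun i => pvXor data i total)).getD i 0)) c0 r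
  obtain ⟨hBlen, hB1, hB2⟩ := hBfin
  apply List.ext_getElem
  · rw [hAlen, hBlen, hlen]
  · intro q hq1 hq2
    have hq : q < total := by rw [hAlen] at hq1; exact hq1
    rw [← List.getD_eq_getElem _ 0 hq1, ← List.getD_eq_getElem _ 0 hq2]
    by_cases hnp : (q + 1) &&& q ≠ 0
    · rw [hA1 q hq hnp]
      rw [hB1 q (by omega) (by
        intro k hk he
        apply hnp
        have h1 : 0 < 2 ^ k := Nat.two_pow_pos k
        have hq0 : q = 2 ^ k - 1 := by omega
        rw [he, hq0]
        exact pow_and_pred k)]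
      exact (hc1 q hq hnp).symm
    · rw [not_ne_iff] at hnp
      have hq1p : q + 1 = 2 ^ (q + 1).log2 :=
        eq_pow_of_and_pred (by omega) (by simpa using hnp)
      have hklt : (q + 1).log2 < r := by
        have h1 : 2 ^ (q + 1).log2 < 2 ^ r := by omega
        exact (Nat.pow_lt_pow_iff_right (by omega)).mp h1
      rw [hA2 q hq hnp ((q + 1).log2) hq1p, if_pos hklt]
      rw [hB2 q (by omega) ((q + 1).log2) hklt hq1p]
      rw [getD_map_range _ _ _ hklt]
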